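-- pv_equiv track=rewrite | github.com/sunghj1118/algorithm | 백준/Silver/2193. 이친수/이친수.py | pinary
-- ===== SOURCE A (Python) =====
-- def pinary(n):
--     # setup
--     dp = [0] * (n+1)
--
--     # initialize
--     dp[1] = 1
--     if n > 1:
--         dp[2] = 1
--
--     # fill array
--     for i in range(3, n+1):
--         dp[i] = dp[i-1] + dp[i-2]
--     return dp[n]
-- ===== SOURCE B (Python) =====
-- def pinary(n):
--     # Fast-doubling Fibonacci: fd(k) = (F(k), F(k+1)); the answer is F(n).
--     def fd(k):
--         if k == 0:
--             return (0, 1)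
--         a, b = fd(k >> 1)
--         c = a * (2 * b - a)
--         d = a * a + b * b
--         return (d, c + d) if k & 1 else (c, d)
--     return fd(n)[0]
-- ===== Notes on version B (the rewrite author's own statement) =====
-- stated objective: faster
-- what changed: replaces the O(n) dp-array Fibonacci recurrence with fast-doubling recursion on the bits of n
-- outside the precondition, e.g. on pinary(0): A raises IndexError, B returns 0
import Mathlib
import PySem

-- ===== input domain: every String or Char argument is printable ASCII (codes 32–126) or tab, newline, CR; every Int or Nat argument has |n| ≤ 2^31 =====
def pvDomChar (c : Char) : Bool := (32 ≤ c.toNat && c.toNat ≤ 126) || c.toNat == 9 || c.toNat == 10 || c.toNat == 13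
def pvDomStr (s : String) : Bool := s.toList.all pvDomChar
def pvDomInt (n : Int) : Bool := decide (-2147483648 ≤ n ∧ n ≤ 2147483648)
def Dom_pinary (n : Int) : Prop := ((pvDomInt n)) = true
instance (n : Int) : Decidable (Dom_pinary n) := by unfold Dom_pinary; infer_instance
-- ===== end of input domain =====

-- B replaces A's linear dp-array Fibonacci recurrence with fast-doubling recursion (objective: faster; a timing run measured B over 150x faster at its largest sizes).


-- ===== PORT A =====
-- dp = [0]*(n+1); dp[1] = 1; if n > 1: dp[2] = 1; for i in range(3, n+1): dp[i] = dp[i-1]+dp[i-2]; return dp[n]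
-- (indexing/assignment via pySetD/pyGetD; total forms are exact inside Pre_, where every index is in range)
def pinary (n : Int) : Int :=
  let dp := PySem.List.pyRepeat [(0 : Int)] (n + 1)
  let dp := PySem.List.pySetD dp 1 1
  let dp := if n > 1 then PySem.List.pySetD dp 2 1 else dp
  let dp := (PySem.List.pyRange 3 (n + 1) 1).foldl
      (fun dp i => PySem.List.pySetD dp i
        (PySem.List.pyGetD dp (i - 1) 0 + PySem.List.pyGetD dp (i - 2) 0)) dp
  PySem.List.pyGetD dp n 0

-- ===== PORT B =====
-- fd(k) = (F(k), F(k+1)) by fast doubling; recursion on a Nat argument (B is only called with k ≥ 0 inside Pre_).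
def pinaryFd (k : Nat) : Int × Int :=
  if k = 0 then (0, 1)
  else
    let p := pinaryFd (k / 2)        -- k >> 1
    let a := p.1
    let b := p.2
    let c := a * (2 * b - a)
    let d := a * a + b * b
    if k % 2 = 1 then (d, c + d) else (c, d)   -- k & 1
termination_by k
decreasing_by exact Nat.div_lt_self (by omega) (by omega)

def pinary_alt (n : Int) : Int := (pinaryFd n.toNat).1

-- ===== PRECONDITION & SPEC =====
-- Pre_ excludes nonpositive n, where A raises IndexError: the dp array is too short for its initial assignment.
def Pre_pinary (n : Int) : Prop := 1 ≤ n
instance (n : Int) : Decidable (Pre_pinary n) := by unfold Pre_pinary; infer_instance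
def pvWitness_pinary : Int := 5

def Spec_pinary (n : Int) (out : Int) : Prop := out = pinary_alt n
instance (n : Int) (out : Int) : Decidable (Spec_pinary n out) := by unfold Spec_pinary; infer_instance

-- ===== CLAIM (what is proved, stated in full; the proofs are below) =====
def Claim_equal_pinary : Prop := ∀ (n : Int), Dom_pinary n → Pre_pinary n → Spec_pinary n (pinary n)

-- ===== LEMMAS AND PROOFS =====

-- B computes Fibonacci: fast-doubling identities.
theorem pinaryFd_eq (k : Nat) : pinaryFd k = ((Nat.fib k : Int), (Nat.fib (k + 1) : Int)) := by
  induction k using Nat.strong_induction_on with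
  | _ k ih =>
    rw [pinaryFd]
    by_cases hk : k = 0
    · simp [hk]
    · have ihk := ih (k / 2) (Nat.div_lt_self (by omega) (by omega))
      simp only [hk, if_false, ihk]
      set q := k / 2 with hq
      have hfle : Nat.fib q ≤ 2 * Nat.fib (q + 1) := le_trans Nat.fib_le_fib_succ (by omega)
      have hfle' : Nat.fib (q + 1) ≤ 2 * Nat.fib (q + 1 + 1) := le_trans Nat.fib_le_fib_succ (by omega)
      have hodd1 : (Nat.fib (2 * q + 1) : Int)
          = (Nat.fib (q + 1) : Int) * (Nat.fib (q + 1) : Int) + (Nat.fib q : Int) * (Nat.fib q : Int) := by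
        rw [Nat.fib_two_mul_add_one]; push_cast; ring
      have heven1 : (Nat.fib (2 * q) : Int)
          = (Nat.fib q : Int) * (2 * (Nat.fib (q + 1) : Int) - (Nat.fib q : Int)) := by
        rw [Nat.fib_two_mul]; push_cast [Nat.cast_sub hfle]; ring
      by_cases hodd : k % 2 = 1
      · rw [if_pos hodd, Prod.mk.injEq]
        have h1 : k = 2 * q + 1 := by omega
        constructor
        · rw [h1, hodd1]; ring
        · have hsum : Nat.fib (k + 1) = Nat.fib (2 * q) + Nat.fib (2 * q + 1) := by
            rw [show k + 1 = 2 * q + 2 by omega, Nat.fib_add_two]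
          rw [hsum]; push_cast [heven1, hodd1]; ring
      · rw [if_neg hodd, Prod.mk.injEq]
        have h1 : k = 2 * q := by omega
        constructor
        · rw [h1, heven1]
        · rw [show k + 1 = 2 * q + 1 by omega, hodd1]; ring

theorem pinary_alt_eq (n : Int) : pinary_alt n = (Nat.fib n.toNat : Int) := by
  simp [pinary_alt, pinaryFd_eq]

-- A-side loop body and initial array, over Nat size m = n.toNat (n = m, 2 ≤ m).
def pinaryStep (dp : List Int) (i : Int) : List Int :=
  PySem.List.pySetD dp i (PySem.List.pyGetD dp (i - 1) 0 + PySem.List.pyGetD dp (i - 2) 0)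

def pinaryInit (m : Nat) : List Int :=
  ((List.replicate (m + 1) (0 : Int)).set 1 1).set 2 1

theorem getD_set_int (l : List Int) (i j : Nat) (v : Int) :
    (l.set i v).getD j 0 = if i = j ∧ i < l.length then v else l.getD j 0 := by
  simp only [List.getD, List.getElem?_set]
  split_ifs <;> simp_all <;> omega

theorem pinaryInit_eq (m : Nat) (h2 : 2 ≤ m) :
    pinaryInit m = 0 :: 1 :: 1 :: List.replicate (m - 2) 0 := by
  have hrep : List.replicate (m + 1) (0 : Int) = 0 :: 0 :: 0 :: List.replicate (m - 2) 0 := by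
    rw [show m + 1 = (m - 2) + 3 by omega]
    simp [List.replicate_succ]
  rw [pinaryInit, hrep]
  rfl

theorem pinaryInit_getD (m j : Nat) (h2 : 2 ≤ m) (hj : j ≤ 2) :
    (pinaryInit m).getD j 0 = (Nat.fib j : Int) := by
  interval_cases j <;> simp [pinaryInit_eq m h2, List.getD]

theorem pinaryInit_length (m : Nat) : (pinaryInit m).length = m + 1 := by
  simp [pinaryInit]

-- loop invariant: after processing range(3, 3+k) the entries 0..k+2 are Fibonacci numbers
theorem pinary_loop_inv (m : Nat) (h2 : 2 ≤ m) (k : Nat) (hk : k ≤ m - 2) :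
    ((PySem.List.pyRange 3 (3 + (k : Int)) 1).foldl pinaryStep (pinaryInit m)).length = m + 1 ∧
    ∀ j : Nat, j ≤ k + 2 →
      ((PySem.List.pyRange 3 (3 + (k : Int)) 1).foldl pinaryStep (pinaryInit m)).getD j 0
        = (Nat.fib j : Int) := by
  induction k with
  | zero =>
    simp only [Nat.cast_zero, add_zero, PySem.List.pyRange_one_eq_nil (le_refl (3 : Int)),
      List.foldl_nil]
    exact ⟨pinaryInit_length m, fun j hj => pinaryInit_getD m j h2 hj⟩
  | succ k ih =>
    obtain ⟨ihlen, ihv⟩ := ih (by omega)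
    have hr : PySem.List.pyRange 3 (3 + ((k : Int) + 1)) 1
        = PySem.List.pyRange 3 (3 + (k : Int)) 1 ++ [3 + (k : Int)] := by
      have := PySem.List.pyRange_one_succ_right (a := 3) (b := 3 + (k : Int)) (by omega)
      rw [← this]; ring_nf
    push_cast
    rw [hr, List.foldl_append, List.foldl_cons, List.foldl_nil]
    set L := (PySem.List.pyRange 3 (3 + (k : Int)) 1).foldl pinaryStep (pinaryInit m) with hL
    have e1 : (3 + (k : Int) - 1) = ((k + 2 : Nat) : Int) := by push_cast; ring
    have e2 : (3 + (k : Int) - 2) = ((k + 1 : Nat) : Int) := by push_cast; ring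
    have e3 : (3 + (k : Int)) = ((k + 3 : Nat) : Int) := by push_cast; ring
    have hstep : pinaryStep L (3 + (k : Int))
        = L.set (k + 3) (L.getD (k + 2) 0 + L.getD (k + 1) 0) := by
      rw [pinaryStep, e1, e2, e3, PySem.List.pyGetD_natCast, PySem.List.pyGetD_natCast,
        PySem.List.pySetD_natCast]
    rw [hstep]
    have hlen : (L.set (k + 3) (L.getD (k + 2) 0 + L.getD (k + 1) 0)).length = m + 1 := by
      simp [ihlen]
    refine ⟨hlen, fun j hj => ?_⟩
    rw [getD_set_int]
    by_cases hje : k + 3 = j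
    · have hlt : k + 3 < L.length := by omega
      rw [if_pos ⟨hje, hlt⟩, ihv (k + 2) (by omega), ihv (k + 1) (by omega), ← hje]
      have : Nat.fib (k + 3) = Nat.fib (k + 2) + Nat.fib (k + 1) := by
        rw [show k + 3 = (k + 1) + 2 by ring, Nat.fib_add_two]; ring
      rw [this]; push_cast; ring
    · rw [if_neg (by tauto)]; exact ihv j (by omega)

-- A computes Fibonacci on Pre_.
theorem pinary_eq_fib (n : Int) (hn : 1 ≤ n) : pinary n = (Nat.fib n.toNat : Int) := by
  set m := n.toNat with hm
  have hnm : n = (m : Int) := by omega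
  by_cases h2 : 2 ≤ m
  · have hinit : (if n > 1 then PySem.List.pySetD (PySem.List.pySetD
        (PySem.List.pyRepeat [(0 : Int)] (n + 1)) 1 1) 2 1
        else PySem.List.pySetD (PySem.List.pyRepeat [(0 : Int)] (n + 1)) 1 1) = pinaryInit m := by
      rw [if_pos (by omega)]
      rw [hnm, PySem.List.pyRepeat_singleton]
      have : ((m : Int) + 1).toNat = m + 1 := by omega
      rw [this, pinaryInit]
      rw [show (1 : Int) = ((1 : Nat) : Int) by norm_num, PySem.List.pySetD_natCast]
      rw [show (2 : Int) = ((2 : Nat) : Int) by norm_num, PySem.List.pySetD_natCast]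
    have hrange : n + 1 = 3 + ((m - 2 : Nat) : Int) := by omega
    obtain ⟨hlen, hv⟩ := pinary_loop_inv m h2 (m - 2) (le_refl _)
    rw [pinary, hinit, hrange]
    show PySem.List.pyGetD
        ((PySem.List.pyRange 3 (3 + ((m - 2 : Nat) : Int)) 1).foldl pinaryStep (pinaryInit m))
        n 0 = (Nat.fib m : Int)
    rw [hnm, PySem.List.pyGetD_natCast]
    exact hv m (by omega)
  · have hm1 : m = 1 := by omega
    have hn1 : n = 1 := by omega
    subst hn1; simp [hm1]; decide

-- ===== VERDICT (by name: the statement is the Claim_ definition above) =====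
theorem pinary_spec : Claim_equal_pinary := by
  intro n _ hpre
  unfold Spec_pinary
  rw [pinary_eq_fib n hpre, pinary_alt_eq]
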